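-- pv_equiv track=rewrite | github.com/William-Lake/Shea | src/search_environment_variables.py | determine_match_type
-- ===== SOURCE A (Python) =====
-- def determine_match_type(name, value, search_string):
--
--     match_type_determiners = {
--         "BOTH": lambda: search_string.upper() in name.upper()
--         and search_string.upper() in value.upper(),
--         "NAME": lambda: search_string.upper() in name.upper(),
--         "VALUE": lambda: search_string.upper() in value.upper(),
--     }
--
--     match_type = None
--
--     for mt, determiner in match_type_determiners.items():
--
--         if determiner():
--
--             match_type = mt
--
--             break
--
--     return match_type
-- ===== SOURCE B (Python) =====
-- _MATCH_TABLE = (None, "VALUE", "NAME", "BOTH")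
--
-- def determine_match_type(name, value, search_string):
--     s = search_string.upper()
--     code = 2 * (s in name.upper()) + (s in value.upper())
--     return _MATCH_TABLE[code]
-- ===== Notes on version B (the rewrite author's own statement) =====
-- stated objective: simpler
-- what changed: B replaces A's priority chain (an ordered dict of lambdas scanned with for/break, re-evaluating substring checks) with a branch-free encoding: the two membership tests become a 2-bit integer that indexes a constant result table.
import Mathlib
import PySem

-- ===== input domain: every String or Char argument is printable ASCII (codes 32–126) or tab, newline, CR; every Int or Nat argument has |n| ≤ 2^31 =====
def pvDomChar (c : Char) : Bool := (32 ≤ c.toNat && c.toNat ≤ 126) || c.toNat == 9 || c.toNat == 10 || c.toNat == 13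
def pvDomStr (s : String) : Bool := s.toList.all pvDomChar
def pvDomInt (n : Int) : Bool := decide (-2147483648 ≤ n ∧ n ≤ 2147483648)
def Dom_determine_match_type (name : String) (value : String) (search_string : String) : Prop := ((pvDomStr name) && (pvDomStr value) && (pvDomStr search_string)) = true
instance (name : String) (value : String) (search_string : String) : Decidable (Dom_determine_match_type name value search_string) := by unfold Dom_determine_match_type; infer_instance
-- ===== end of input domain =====

-- B encodes the two membership tests as a 2-bit integer indexing a constant result table, replacing A's dict-of-lambdas priority loop; objective: simpler.


-- ===== PORT A =====
-- A's for/break over dict.items(): first entry whose predicate holds, else the initial None.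
def pyFirstMatch : List (String × Bool) → Option String
  | [] => none
  | (mt, determiner) :: rest => if determiner then some mt else pyFirstMatch rest

def determine_match_type (name : String) (value : String) (search_string : String) : Option String :=
  let match_type_determiners : List (String × Bool) :=
    [("BOTH", PySem.Str.isIn (PySem.Str.upper search_string) (PySem.Str.upper name)
              && PySem.Str.isIn (PySem.Str.upper search_string) (PySem.Str.upper value)),
     ("NAME", PySem.Str.isIn (PySem.Str.upper search_string) (PySem.Str.upper name)),
     ("VALUE", PySem.Str.isIn (PySem.Str.upper search_string) (PySem.Str.upper value))]
  pyFirstMatch match_type_determiners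

-- ===== PORT B =====
def pvMatchTable : List (Option String) := [none, some "VALUE", some "NAME", some "BOTH"]

def determine_match_type_alt (name : String) (value : String) (search_string : String) : Option String :=
  let s := PySem.Str.upper search_string
  let code : Int := 2 * (if PySem.Str.isIn s (PySem.Str.upper name) then 1 else 0)
                      + (if PySem.Str.isIn s (PySem.Str.upper value) then 1 else 0)
  -- Python tuple indexing; code ∈ [0,3] so the lookup always succeeds (none branch unreachable)
  match PySem.List.pyGet? pvMatchTable code with
  | some r => r
  | none => none

-- ===== PRECONDITION & SPEC =====
def Spec_determine_match_type (name : String) (value : String) (search_string : String) (out : Option String) : Prop := out = determine_match_type_alt name value search_string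
instance (name : String) (value : String) (search_string : String) (out : Option String) : Decidable (Spec_determine_match_type name value search_string out) := by unfold Spec_determine_match_type; infer_instance

-- ===== CLAIM (what is proved, stated in full; the proofs are below) =====
def Claim_equal_determine_match_type : Prop := ∀ (name : String) (value : String) (search_string : String), Dom_determine_match_type name value search_string → Spec_determine_match_type name value search_string (determine_match_type name value search_string)

-- ===== LEMMAS AND PROOFS =====

-- ===== VERDICT (by name: the statement is the Claim_ definition above) =====
theorem determine_match_type_spec : Claim_equal_determine_match_type := by
  intro name value search_string _
  unfold Spec_determine_match_type determine_match_type determine_match_type_alt pyFirstMatch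
  by_cases hn : PySem.Str.isIn (PySem.Str.upper search_string) (PySem.Str.upper name) = true <;>
  by_cases hv : PySem.Str.isIn (PySem.Str.upper search_string) (PySem.Str.upper value) = true <;>
  simp_all [pyFirstMatch, pvMatchTable, PySem.List.pyGet?, PySem.List.pyIdx?]
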